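-- pv_equiv track=rewrite | github.com/pypi-data/pypi-mirror-192 | packages/admcycles/admcycles-1.4-py3-none-any.whl/admcycles/diffstrata/auxiliary.py | adm_key
-- ===== SOURCE A (Python) =====
-- from collections import defaultdict
--
-- def adm_key(sig, psis):
--     """
--     The hash of a psi monomial on a connected stratum without residue conditions.
--
--     This is used for caching the values computed using admcycles (using
--     GeneralisedStratum.adm_evaluate)
--
--     The signature is sorted, the psis are renumbered accordingly and also
--     sorted (with the aim of computing as few duplicates as possible).
--
--     Args:
--         sig (tuple): signature tuple
--         psis (dict): psi dictionary
--
--     Returns: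
--         tuple: nested tuple
--     """
--     sorted_psis = {}
--     sorted_sig = []
--     psi_by_order = defaultdict(list)
--     # sort signature and relabel psis accordingly:
--     # NOTE: Psis are labelled 'mathematically', i.e. 1,...,len(sig)
--     for new_i, (old_i, order) in enumerate(
--             sorted(enumerate(sig), key=lambda k: k[1])):
--         psi_new_i = new_i + 1
--         psi_old_i = old_i + 1
--         sorted_sig.append(order)
--         if psi_old_i in psis:
--             assert not (psi_new_i in sorted_psis)
--             psi_exp = psis[psi_old_i]
--             sorted_psis[psi_new_i] = psi_exp
--             psi_by_order[order].append(psi_exp)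
--     # sort psis for points of same order:
--     ordered_sorted_psis = {}
--     i = 0
--     assert len(sig) == len(sorted_sig)
--     while i < len(sig):
--         order = sorted_sig[i]
--         for j, psi_exp in enumerate(sorted(psi_by_order[order])):
--             assert sorted_sig[i + j] == order
--             ordered_sorted_psis[i + j + 1] = psi_exp
--         while i < len(sig) and sorted_sig[i] == order:
--             i += 1
--     return (tuple(sorted_sig), tuple(sorted(ordered_sorted_psis.items())))
-- ===== SOURCE B (Python) =====
-- from bisect import bisect_left
--
--
-- def adm_key(sig, psis):
--     """Canonical hash key: flat sort of (order, exponent) pairs, each placed by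
--     binary search plus a running per-order rank -- no relabeling dicts, no
--     grouped re-scanning, no final re-sort."""
--     sorted_sig = sorted(sig)
--     opairs = sorted((sig[k - 1], v) for k, v in psis.items() if 1 <= k <= len(sig))
--     pairs = []
--     seen = {}
--     for order, exp in opairs:
--         rank = seen.get(order, 0)
--         seen[order] = rank + 1
--         pairs.append((bisect_left(sorted_sig, order) + rank + 1, exp))
--     return (tuple(sorted_sig), tuple(pairs))
-- ===== Notes on version B (the rewrite author's own statement) =====
-- stated objective: simpler
-- what changed: Replaces A's relabeling pass over sorted(enumerate(sig)), the per-order defaultdict, the nested while-loop group re-scanning and the final re-sort of the result dict by one flat sort of (order, exponent) pairs placed directly via bisect_left plus a running per-order rank counter.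
import Mathlib
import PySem

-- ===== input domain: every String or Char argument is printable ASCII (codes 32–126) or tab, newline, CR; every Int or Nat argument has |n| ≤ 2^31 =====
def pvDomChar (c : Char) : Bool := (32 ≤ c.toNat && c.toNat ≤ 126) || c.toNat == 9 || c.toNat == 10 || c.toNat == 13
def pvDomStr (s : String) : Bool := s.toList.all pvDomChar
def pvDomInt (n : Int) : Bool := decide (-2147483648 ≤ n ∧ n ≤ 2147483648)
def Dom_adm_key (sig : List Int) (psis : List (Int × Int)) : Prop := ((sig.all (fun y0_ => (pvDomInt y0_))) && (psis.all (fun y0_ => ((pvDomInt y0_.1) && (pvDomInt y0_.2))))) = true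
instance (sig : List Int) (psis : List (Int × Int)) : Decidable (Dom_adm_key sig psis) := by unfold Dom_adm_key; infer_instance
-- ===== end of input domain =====

-- ===== PORT A =====
-- B replaces A's relabeling pass, per-order defaultdict, nested while-loop group scanning and
-- final re-sort by one flat sort of (order, exp) pairs placed via bisect_left + a rank counter.
-- A's inner `while i < len(sig) and sorted_sig[i] == order: i += 1`
def admSkipA (ssig : List Int) (order : Int) (i : Nat) : Nat :=
  if i < ssig.length ∧ ssig.getD i 0 = order then admSkipA ssig order (i + 1) else i
termination_by ssig.length - i
decreasing_by omega

theorem le_admSkipA (ssig : List Int) (order : Int) (i : Nat) : i ≤ admSkipA ssig order i := by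
  fun_induction admSkipA with
  | case1 i h ih => omega
  | case2 i h => omega

-- A's outer `while i < len(sig): ...` filling ordered_sorted_psis (asserts omitted: they cannot fire)
def admLoopA (ssig : List Int) (pbo : PySem.Dict Int (List Int)) (i : Nat)
    (osp : PySem.Dict Int Int) : PySem.Dict Int Int :=
  if i < ssig.length then
    let order := ssig.getD i 0
    let osp' := (PySem.List.enumerate (PySem.List.sorted (pbo.getD order []) (fun x => x) false) 0).foldl
        (fun d je => d.insert ((i : Int) + je.1 + 1) je.2) osp
    admLoopA ssig pbo (admSkipA ssig order (i + 1)) osp'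
  else osp
termination_by ssig.length - i
decreasing_by
  have := le_admSkipA ssig (ssig.getD i 0) (i + 1)
  omega

def adm_key (sig : List Int) (psis : List (Int × Int)) : List Int × (List (Int × Int)) :=
  let P := PySem.Dict.mk psis
  -- `for new_i, (old_i, order) in enumerate(sorted(enumerate(sig), key=lambda k: k[1]))`
  let st := (PySem.List.enumerate (PySem.List.sorted (PySem.List.enumerate sig 0) (fun k => k.2) false) 0).foldl
    (fun (st : PySem.Dict Int Int × List Int × PySem.Dict Int (List Int)) p =>
      let psi_new_i := p.1 + 1
      let psi_old_i := p.2.1 + 1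
      let order := p.2.2
      let ssig := st.2.1 ++ [order]
      match P.get? psi_old_i with
      | some psi_exp =>
          (st.1.insert psi_new_i psi_exp, ssig, st.2.2.modify order [] (fun l => l ++ [psi_exp]))
      | none => (st.1, ssig, st.2.2))
    (PySem.Dict.empty, ([], PySem.Dict.empty))
  let osp := admLoopA st.2.1 st.2.2 0 PySem.Dict.empty
  (st.2.1, PySem.List.sorted2 osp.items (fun p => p.1) (fun p => p.2) false)

-- ===== PORT B =====
def adm_key_alt (sig : List Int) (psis : List (Int × Int)) : List Int × (List (Int × Int)) :=
  let s := PySem.List.sorted sig (fun x => x) false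
  let P := PySem.Dict.mk psis
  let opairs := PySem.List.sorted2
      (P.items.filterMap (fun kv =>
        if 1 ≤ kv.1 ∧ kv.1 ≤ PySem.List.len sig then
          some (PySem.List.pyGetD sig (kv.1 - 1) 0, kv.2)
        else none))
      (fun p => p.1) (fun p => p.2) false
  let st := opairs.foldl (fun (st : PySem.Dict Int Int × List (Int × Int)) oe =>
      let rank := st.1.getD oe.1 0
      (st.1.insert oe.1 (rank + 1),
       st.2 ++ [(((PySem.List.bisectLeft s oe.1 : Nat) : Int) + rank + 1, oe.2)]))
    (PySem.Dict.empty, [])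
  (s, st.2)

-- ===== PRECONDITION & SPEC =====
-- psis is a Python dict: an association list with DUPLICATE keys does not represent one, so Pre_
-- admits exactly the lists with pairwise-distinct keys (it excludes nothing a Python call can pass).
def Pre_adm_key (sig : List Int) (psis : List (Int × Int)) : Prop :=
  (psis.map (fun p => p.1)).Nodup
instance (sig : List Int) (psis : List (Int × Int)) : Decidable (Pre_adm_key sig psis) := by
  unfold Pre_adm_key; infer_instance
def pvWitness_adm_key : List Int × (List (Int × Int)) := ([0, 1, 0], [(1, 2), (3, 1)])

def Spec_adm_key (sig : List Int) (psis : List (Int × Int)) (out : List Int × (List (Int × Int))) : Prop := out = adm_key_alt sig psis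
instance (sig : List Int) (psis : List (Int × Int)) (out : List Int × (List (Int × Int))) : Decidable (Spec_adm_key sig psis out) := by unfold Spec_adm_key; infer_instance

-- ===== CLAIM (what is proved, stated in full; the proofs are below) =====
def Claim_equal_adm_key : Prop := ∀ (sig : List Int) (psis : List (Int × Int)), Dom_adm_key sig psis → Pre_adm_key sig psis → Spec_adm_key sig psis (adm_key sig psis)

-- ===== LEMMAS AND PROOFS =====

-- lexicographic (non-strict) order on pairs, the order `sorted(list_of_pairs)` uses
def lexR (a b : Int × Int) : Prop := a.1 < b.1 ∨ (a.1 = b.1 ∧ a.2 ≤ b.2)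

-- shorthands for the values both ports compute
def admS (sig : List Int) : List Int := PySem.List.sorted sig (fun x => x) false

def admLB (sig : List Int) (psis : List (Int × Int)) : List (Int × Int) :=
  psis.filterMap (fun kv =>
    if 1 ≤ kv.1 ∧ kv.1 ≤ PySem.List.len sig then
      some (PySem.List.pyGetD sig (kv.1 - 1) 0, kv.2)
    else none)

def admOP (sig : List Int) (psis : List (Int × Int)) : List (Int × Int) :=
  PySem.List.sorted2 (admLB sig psis) (fun p => p.1) (fun p => p.2) false

def admE (sig : List Int) (psis : List (Int × Int)) (o : Int) : List Int :=
  ((admOP sig psis).filter (fun p => p.1 == o)).map (fun p => p.2)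

-- one output block: exponents es paired with positions base+r+1, base+r+2, ...
def chunkAt (base : Int) (es : List Int) (r : Int) : List (Int × Int) :=
  (PySem.List.enumerate es r).map (fun je => (base + je.1 + 1, je.2))

-- B's fold, with the accumulator list peeled off
def goB (s : List Int) : List (Int × Int) → PySem.Dict Int Int → List (Int × Int)
  | [], _ => []
  | oe :: t, d =>
      (((PySem.List.bisectLeft s oe.1 : Nat) : Int) + d.getD oe.1 0 + 1, oe.2) ::
        goB s t (d.insert oe.1 (d.getD oe.1 0 + 1))

-- A's while loop, with the dict replaced by the list of pairs it inserts
def blocksA (s : List Int) (E : Int → List Int) (i : Nat) : List (Int × Int) :=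
  if i < s.length then
    chunkAt (i : Int) (E (s.getD i 0)) 0 ++ blocksA s E (admSkipA s (s.getD i 0) (i + 1))
  else []
termination_by s.length - i
decreasing_by
  have := le_admSkipA s (s.getD i 0) (i + 1)
  omega

-- ---- generic order lemmas ----
theorem lexR_antisymm {a b : Int × Int} (h1 : lexR a b) (h2 : lexR b a) : a = b := by
  unfold lexR at h1 h2
  have : a.1 = b.1 ∧ a.2 = b.2 := by omega
  exact Prod.ext this.1 this.2

theorem pairwise_insertBy_lexR (x : Int × Int) (ys : List (Int × Int)) (h : ys.Pairwise lexR) :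
    (PySem.List.insertBy (fun a b => decide (a.1 < b.1) || (!decide (b.1 < a.1) && decide (a.2 < b.2))) x ys).Pairwise lexR := by
  induction ys with
  | nil => simp [PySem.List.insertBy, lexR]
  | cons y ys ih =>
    rw [List.pairwise_cons] at h
    simp only [PySem.List.insertBy]
    split
    · rename_i hb
      simp only [Bool.or_eq_true, Bool.and_eq_true, decide_eq_true_eq, Bool.not_eq_eq_eq_not,
        Bool.not_true, decide_eq_false_iff_not] at hb
      have hxy : lexR x y := by unfold lexR; omega
      refine List.Pairwise.cons ?_ (List.Pairwise.cons h.1 h.2)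
      intro z hz
      rcases List.mem_cons.mp hz with rfl | hz
      · exact hxy
      · have := h.1 z hz
        unfold lexR at *; omega
    · rename_i hb
      simp only [Bool.or_eq_true, Bool.and_eq_true, decide_eq_true_eq, Bool.not_eq_eq_eq_not,
        Bool.not_true, decide_eq_false_iff_not, not_or, not_and] at hb
      refine List.Pairwise.cons ?_ (ih h.2)
      intro z hz
      rw [PySem.List.mem_insertBy] at hz
      rcases hz with rfl | hz
      · unfold lexR; omega
      · exact h.1 z hz

theorem sorted2_pairwise_lexR (xs : List (Int × Int)) :
    (PySem.List.sorted2 xs (fun p => p.1) (fun p => p.2) false).Pairwise lexR := by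
  simp only [PySem.List.sorted2]
  have : ∀ (l : List (Int × Int)) (acc : List (Int × Int)), acc.Pairwise lexR →
      (l.foldl (fun acc x => PySem.List.insertBy
        (fun a b => decide (a.1 < b.1) || (!decide (b.1 < a.1) && decide (a.2 < b.2))) x acc) acc).Pairwise lexR := by
    intro l
    induction l with
    | nil => intro acc h; simpa using h
    | cons z l ih =>
      intro acc h
      exact ih _ (pairwise_insertBy_lexR z acc h)
  exact this xs [] (by simp)

theorem sorted2_eq_of_perm_of_pairwise (xs l : List (Int × Int)) (hp : l.Perm xs)
    (hs : l.Pairwise lexR) : PySem.List.sorted2 xs (fun p => p.1) (fun p => p.2) false = l := by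
  refine List.Perm.eq_of_pairwise (le := lexR) ?_ (sorted2_pairwise_lexR xs) hs ?_
  · intro a b _ _ h1 h2; exact lexR_antisymm h1 h2
  · exact (PySem.List.sorted2_perm xs _ _ false).trans hp.symm

theorem map_snd_sorted_enumerate (sig : List Int) :
    (PySem.List.sorted (PySem.List.enumerate sig 0) (fun k => k.2) false).map (fun p => p.2)
      = admS sig := by
  refine List.Perm.eq_of_pairwise (le := fun a b : Int => a ≤ b) ?_ ?_ ?_ ?_
  · intro a b _ _ h1 h2; omega
  · exact PySem.List.sorted_map_key_pairwise _ _
  · exact PySem.List.sorted_pairwise sig (fun x => x)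
  · have h1 := (PySem.List.sorted_perm (PySem.List.enumerate sig 0) (fun k => k.2) false).map (fun p => p.2)
    rw [PySem.List.map_snd_enumerate] at h1
    exact h1.trans (PySem.List.sorted_perm sig (fun x => x) false).symm

-- ---- phase-1 fold of A ----
theorem phase1_snd (psis : List (Int × Int))
    (l : List (Int × (Int × Int))) (st : PySem.Dict Int Int × List Int × PySem.Dict Int (List Int)) :
    (l.foldl (fun st p =>
      match (PySem.Dict.mk psis).get? (p.2.1 + 1) with
      | some psi_exp =>
          (st.1.insert (p.1 + 1) psi_exp, st.2.1 ++ [p.2.2], st.2.2.modify p.2.2 [] (fun l => l ++ [psi_exp]))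
      | none => (st.1, st.2.1 ++ [p.2.2], st.2.2)) st).2
    = (st.2.1 ++ l.map (fun p => p.2.2),
       (l.filterMap (fun p => ((PySem.Dict.mk psis).get? (p.2.1 + 1)).map (fun e => (p.2.2, e)))).foldl
         (fun d q => d.modify q.1 [] (fun l => l ++ [q.2])) st.2.2) := by
  induction l generalizing st with
  | nil => simp
  | cons p l ih =>
    simp only [List.foldl_cons, List.map_cons, List.filterMap_cons]
    cases hg : (PySem.Dict.mk psis).get? (p.2.1 + 1) with
    | none => rw [ih]; simp
    | some e => rw [ih]; simp


theorem filterMap_enumerate_snd {α β : Type} (f : α → Option β) (xs : List α) :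
    ∀ (st : Int), (PySem.List.enumerate xs st).filterMap (fun p => f p.2) = xs.filterMap f := by
  induction xs with
  | nil => intro st; simp [PySem.List.enumerate]
  | cons x xs ih =>
    intro st
    rw [PySem.List.enumerate_cons, List.filterMap_cons, List.filterMap_cons, ih (st + 1)]

-- ---- the (order, exp) multiset: A's traversal order vs B's ----
def admF (sig : List Int) (psis : List (Int × Int)) (k : Int) : Int × Int :=
  (PySem.List.pyGetD sig (k - 1) 0, (PySem.Dict.mk psis).getD k 0)

def admK1 (sig : List Int) (psis : List (Int × Int)) : List Int :=
  (List.range sig.length).filterMap (fun (j : Nat) =>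
    if (PySem.Dict.mk psis).contains ((j : Int) + 1) then some ((j : Int) + 1) else none)

def admK2 (sig : List Int) (psis : List (Int × Int)) : List Int :=
  psis.filterMap (fun kv => if 1 ≤ kv.1 ∧ kv.1 ≤ (sig.length : Int) then some kv.1 else none)

theorem contains_eq_isSome (psis : List (Int × Int)) (k : Int) :
    (PySem.Dict.mk psis).contains k = ((PySem.Dict.mk psis).get? k).isSome := by
  rw [Bool.eq_iff_iff]
  simp [PySem.Dict.contains, PySem.Dict.get?, List.any_eq_true, List.find?_isSome]

theorem get?_mk_of_mem_nodup (psis : List (Int × Int)) (hpre : (psis.map (fun p => p.1)).Nodup)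
    (kv : Int × Int) (hm : kv ∈ psis) : (PySem.Dict.mk psis).get? kv.1 = some kv.2 := by
  induction psis with
  | nil => cases hm
  | cons q t ih =>
    rcases List.mem_cons.mp hm with rfl | hm
    · rw [show (PySem.Dict.mk (kv :: t)) = PySem.Dict.mk ((kv.1, kv.2) :: t) by rfl,
        PySem.Dict.get?_mk_cons]
      simp
    · simp only [List.map_cons, List.nodup_cons] at hpre
      have hne : q.1 ≠ kv.1 := by
        intro he
        exact hpre.1 (he ▸ List.mem_map_of_mem hm)
      rw [show (PySem.Dict.mk (q :: t)) = PySem.Dict.mk ((q.1, q.2) :: t) by rfl,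
        PySem.Dict.get?_mk_cons]
      simp only [beq_iff_eq, if_neg hne]
      exact ih hpre.2 hm

theorem L0_eq_K1_map (sig : List Int) (psis : List (Int × Int)) :
    (PySem.List.enumerate sig 0).filterMap
        (fun q => ((PySem.Dict.mk psis).get? (q.1 + 1)).map (fun e => (q.2, e)))
      = (admK1 sig psis).map (admF sig psis) := by
  rw [PySem.List.enumerate_eq_map_pyRange sig 0, PySem.List.len_eq, PySem.List.pyRange_zero_natCast,
    admK1]
  simp only [List.filterMap_map, List.map_filterMap]
  refine List.filterMap_congr ?_
  intro j _
  simp only [Function.comp_def]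
  cases hg : (PySem.Dict.mk psis).get? ((j : Int) + 1) with
  | none =>
    have hc : (PySem.Dict.mk psis).contains ((j : Int) + 1) = false := by
      rw [contains_eq_isSome, hg]; rfl
    simp [hc]
  | some e =>
    have hc : (PySem.Dict.mk psis).contains ((j : Int) + 1) = true := by
      rw [contains_eq_isSome, hg]; rfl
    simp only [hc, if_true, Option.map_some, admF, PySem.Dict.getD, hg]
    rw [show ((j : Int) + 1 - 1) = (j : Int) by ring]
    rfl

theorem LB_eq_K2_map (sig : List Int) (psis : List (Int × Int)) (hpre : Pre_adm_key sig psis) :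
    admLB sig psis = (admK2 sig psis).map (admF sig psis) := by
  rw [admLB, admK2, List.map_filterMap]
  refine List.filterMap_congr ?_
  intro kv hkv
  rw [PySem.List.len_eq]
  split
  · simp only [Option.map_some, admF, PySem.Dict.getD, get?_mk_of_mem_nodup psis hpre kv hkv]
    rfl
  · rfl

theorem K1_perm_K2 (sig : List Int) (psis : List (Int × Int)) (hpre : Pre_adm_key sig psis) :
    (admK1 sig psis).Perm (admK2 sig psis) := by
  have hn1 : (admK1 sig psis).Nodup := by
    rw [admK1]
    refine List.Nodup.filterMap ?_ (List.nodup_range)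
    intro a a' b hb hb'
    simp only [Option.mem_def] at hb hb'
    split at hb <;> split at hb' <;> simp_all
    omega
  have hn2 : (admK2 sig psis).Nodup := by
    rw [admK2, show (fun kv : Int × Int => if 1 ≤ kv.1 ∧ kv.1 ≤ (sig.length : Int) then some kv.1 else none)
        = (fun k => if 1 ≤ k ∧ k ≤ (sig.length : Int) then some k else none) ∘ (fun p : Int × Int => p.1) by rfl,
      ← List.filterMap_map]
    refine List.Nodup.filterMap ?_ hpre
    intro a a' b hb hb'
    simp only [Option.mem_def] at hb hb'
    split at hb <;> split at hb' <;> simp_all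
  rw [List.perm_ext_iff_of_nodup hn1 hn2]
  intro k
  rw [admK1, admK2]
  constructor
  · intro hk
    rcases List.mem_filterMap.mp hk with ⟨j, hj, hsome⟩
    rw [List.mem_range] at hj
    split at hsome
    · rename_i hc
      cases hsome
      rw [contains_eq_isSome] at hc
      cases hg : (PySem.Dict.mk psis).get? ((j : Int) + 1) with
      | none => rw [hg] at hc; cases hc
      | some e =>
        have hfind := hg
        simp only [PySem.Dict.get?, Option.map_eq_some_iff] at hfind
        rcases hfind with ⟨p, hp, hpe⟩
        have hmem := List.mem_of_find?_eq_some hp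
        have hkey : p.1 = (j : Int) + 1 := by
          have := List.find?_some hp
          simpa using this
        refine List.mem_filterMap.mpr ⟨p, hmem, ?_⟩
        rw [if_pos (by omega)]
        rw [hkey]
    · cases hsome
  · intro hk
    rcases List.mem_filterMap.mp hk with ⟨kv, hkv, hsome⟩
    split at hsome
    · rename_i hrange
      cases hsome
      have hc : (PySem.Dict.mk psis).contains kv.1 = true := by
        simp only [PySem.Dict.contains, List.any_eq_true]
        exact ⟨kv, hkv, by simp⟩
      refine List.mem_filterMap.mpr ⟨(kv.1 - 1).toNat, ?_, ?_⟩
      · rw [List.mem_range]; omega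
      · rw [show (((kv.1 - 1).toNat : Int) + 1) = kv.1 by omega, if_pos hc]
    · cases hsome

theorem LS_perm_LB (sig : List Int) (psis : List (Int × Int)) (hpre : Pre_adm_key sig psis) :
    ((PySem.List.sorted (PySem.List.enumerate sig 0) (fun k => k.2) false).filterMap
        (fun q => ((PySem.Dict.mk psis).get? (q.1 + 1)).map (fun e => (q.2, e)))).Perm
      (admLB sig psis) := by
  have h1 := (PySem.List.sorted_perm (PySem.List.enumerate sig 0) (fun k => k.2) false).filterMap
    (fun q => ((PySem.Dict.mk psis).get? (q.1 + 1)).map (fun e => (q.2, e)))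
  rw [L0_eq_K1_map] at h1
  rw [LB_eq_K2_map sig psis hpre]
  exact h1.trans ((K1_perm_K2 sig psis hpre).map _)

theorem countP_range_getD (xs : List Int) (o : Int) :
    (List.range xs.length).countP (fun j => xs.getD j 0 == o) = xs.count o := by
  induction xs with
  | nil => simp
  | cons a t ih =>
    rw [List.length_cons, List.range_succ_eq_map, List.countP_cons, List.countP_map]
    simp only [Function.comp_def, List.getD_cons_succ, List.getD_cons_zero, List.count_cons, ih]

theorem countLB_le (sig : List Int) (psis : List (Int × Int)) (hpre : Pre_adm_key sig psis) (o : Int) :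
    ((admLB sig psis).countP (fun p => p.1 == o) : Nat) ≤ (admS sig).count o := by
  rw [LB_eq_K2_map sig psis hpre,
    ((K1_perm_K2 sig psis hpre).map (admF sig psis)).symm.countP_eq,
    List.countP_map, admK1, List.countP_filterMap]
  have hc : (admS sig).count o = sig.count o :=
    (PySem.List.sorted_perm sig (fun x => x) false).count_eq o
  rw [hc, ← countP_range_getD sig o]
  refine List.countP_mono_left ?_
  intro j hj hp
  rw [List.mem_range] at hj
  split at hp
  · simp only [Option.map_some, Option.getD_some, Function.comp_def] at hp
    simp only [admF] at hp
    rw [show ((j : Int) + 1 - 1) = (j : Int) by ring, PySem.List.pyGetD_natCast] at hp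
    exact hp
  · simp at hp

theorem fst_LB_mem (sig : List Int) (psis : List (Int × Int)) (p : Int × Int)
    (hp : p ∈ admLB sig psis) : p.1 ∈ admS sig := by
  rw [admLB] at hp
  rcases List.mem_filterMap.mp hp with ⟨kv, _, hsome⟩
  rw [PySem.List.len_eq] at hsome
  split at hsome
  · rename_i hr
    cases hsome
    exact (PySem.List.mem_sorted sig (fun x => x) false _).mpr
      (PySem.List.pyGetD_mem sig 0 ⟨by omega, by omega⟩)
  · cases hsome

-- ---- skip lemmas ----
theorem admSkipA_le_len (s : List Int) (o : Int) (i : Nat) (h : i ≤ s.length) :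
    admSkipA s o i ≤ s.length := by
  fun_induction admSkipA with
  | case1 i hc ih => exact ih (by omega)
  | case2 i hc => omega

theorem admSkipA_run (s : List Int) (o : Int) (i : Nat) :
    ∀ j, i ≤ j → j < admSkipA s o i → s.getD j 0 = o := by
  fun_induction admSkipA with
  | case1 i hc ih =>
    intro j h1 h2
    rcases Nat.eq_or_lt_of_le h1 with rfl | h1
    · exact hc.2
    · exact ih j h1 h2
  | case2 i hc =>
    intro j h1 h2
    omega

theorem admSkipA_stop (s : List Int) (o : Int) (i : Nat) (h : admSkipA s o i < s.length) :
    s.getD (admSkipA s o i) 0 ≠ o := by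
  fun_induction admSkipA with
  | case1 i hc ih => exact ih h
  | case2 i hc =>
    intro he
    exact hc ⟨h, he⟩


-- ---- dedup (Set.ofList) structure ----
theorem ofList_sublist {α : Type} [BEq α] [LawfulBEq α] (xs : List α) :
    (PySem.Set.ofList xs).Sublist xs := by
  induction xs with
  | nil => simp [PySem.Set.ofList_nil]
  | cons x xs ih =>
    rw [PySem.Set.ofList_cons]
    exact ((List.filter_sublist).trans ih).cons₂ x

theorem pairwise_lt_ofList (xs : List Int) (h : xs.Pairwise (· ≤ ·)) :
    (PySem.Set.ofList xs).Pairwise (· < ·) := by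
  have hle := h.sublist (ofList_sublist xs)
  have hnd : (PySem.Set.ofList xs).Pairwise (· ≠ ·) := PySem.Set.nodup_ofList xs
  exact (hle.and hnd).imp (fun ⟨h1, h2⟩ => lt_of_le_of_ne h1 h2)

theorem ofList_run (o : Int) (u : List Int) (hu : u ≠ []) (hall : ∀ x ∈ u, x = o) :
    PySem.Set.ofList u = [o] := by
  induction u with
  | nil => cases hu rfl
  | cons x u ih =>
    have hx : x = o := hall x (List.mem_cons_self)
    subst hx
    rw [PySem.Set.ofList_cons]
    by_cases hu' : u = []
    · subst hu'; simp [PySem.Set.ofList_nil, PySem.Set.discard]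
    · rw [ih hu' (fun y hy => hall y (List.mem_cons_of_mem _ hy))]
      simp [PySem.Set.discard]

theorem ofList_run_append (o : Int) (u v : List Int) (hu : u ≠ [])
    (hall : ∀ x ∈ u, x = o) (hv : o ∉ v) :
    PySem.Set.ofList (u ++ v) = o :: PySem.Set.ofList v := by
  rw [PySem.Set.ofList_append, ofList_run o u hu hall,
    PySem.Set.update_eq_append_filter]
  have : (PySem.Set.ofList v).filter (fun y => !(PySem.Set.contains [o] y)) = PySem.Set.ofList v := by
    refine List.filter_eq_self.mpr ?_
    intro y hy
    have : y ∈ v := (PySem.Set.mem_ofList v y).mp hy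
    have : y ≠ o := fun he => hv (he ▸ this)
    simp [PySem.Set.contains, this]
  rw [this]
  rfl

theorem eq_of_pairwise_lt_of_mem_iff (D1 D2 : List Int) (h1 : D1.Pairwise (· < ·))
    (h2 : D2.Pairwise (· < ·)) (hm : ∀ x, x ∈ D1 ↔ x ∈ D2) : D1 = D2 := by
  refine List.Perm.eq_of_pairwise (le := (· < ·)) (fun a b _ _ hab hba => by omega) h1 h2 ?_
  rw [List.perm_ext_iff_of_nodup (h1.imp ne_of_lt) (h2.imp ne_of_lt)]
  exact hm

theorem flatMap_filter_of_nil {α β : Type} (g : α → List β) (D : List α) (p : α → Bool)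
    (h : ∀ o ∈ D, p o = false → g o = []) : D.flatMap g = (D.filter p).flatMap g := by
  induction D with
  | nil => rfl
  | cons x D ih =>
    rw [List.flatMap_cons, List.filter_cons]
    cases hp : p x with
    | true =>
      simp only [if_true]
      rw [List.flatMap_cons, ih (fun o ho => h o (List.mem_cons_of_mem _ ho))]
    | false =>
      simp only [Bool.false_eq_true, if_false]
      rw [h x List.mem_cons_self hp, List.nil_append,
        ih (fun o ho => h o (List.mem_cons_of_mem _ ho))]

-- ---- bisect boundary ----
theorem bisectLeft_boundary (s : List Int) (hs : s.Pairwise (· ≤ ·)) (i : Nat)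
    (hi : i < s.length) (hfirst : ∀ j, j < i → s.getD j 0 < s.getD i 0) :
    PySem.List.bisectLeft s (s.getD i 0) = i := by
  obtain ⟨hble, hlt, hge⟩ := PySem.List.bisectLeft_spec s (s.getD i 0) hs
  rcases Nat.lt_trichotomy (PySem.List.bisectLeft s (s.getD i 0)) i with h | h | h
  · have h1 := hge _ (by omega) (le_refl _)
    have h2 := hfirst _ h
    rw [List.getD_eq_getElem s 0 (by omega)] at h2
    omega
  · exact h
  · have h1 := hlt i (by omega) h
    rw [List.getD_eq_getElem s 0 hi] at h1
    omega


-- ---- run/count facts about A's group skip ----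
theorem skip_facts (s : List Int) (hs : s.Pairwise (· ≤ ·)) (i : Nat) (hi : i < s.length)
    (hfirst : ∀ j, j < i → s.getD j 0 < s.getD i 0) :
    admSkipA s (s.getD i 0) (i + 1) ≤ s.length ∧
    i < admSkipA s (s.getD i 0) (i + 1) ∧
    (∀ j, i ≤ j → j < admSkipA s (s.getD i 0) (i + 1) → s.getD j 0 = s.getD i 0) ∧
    s.count (s.getD i 0) = admSkipA s (s.getD i 0) (i + 1) - i ∧
    (admSkipA s (s.getD i 0) (i + 1) < s.length →
      ∀ j, j < admSkipA s (s.getD i 0) (i + 1) →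
        s.getD j 0 < s.getD (admSkipA s (s.getD i 0) (i + 1)) 0) := by
  have hpg := List.pairwise_iff_getElem.mp hs
  set o := s.getD i 0 with ho
  set k := admSkipA s o (i + 1) with hk
  have hk1 : k ≤ s.length := admSkipA_le_len s o (i + 1) (by omega)
  have hk2 : i < k := by have := le_admSkipA s o (i + 1); omega
  have hrun : ∀ j, i ≤ j → j < k → s.getD j 0 = o := by
    intro j h1 h2
    rcases Nat.eq_or_lt_of_le h1 with rfl | h1
    · rfl
    · exact admSkipA_run s o (i + 1) j h1 h2
  have hgt : k < s.length → o < s.getD k 0 := by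
    intro hkl
    have h1 := admSkipA_stop s o (i + 1) hkl
    rw [← hk] at h1
    have h2 := hpg i k hi hkl hk2
    have e1 : o = s[i] := by rw [ho]; exact List.getD_eq_getElem s 0 hi
    have e2 : s.getD k 0 = s[k] := List.getD_eq_getElem s 0 hkl
    rw [e2, e1] at h1 ⊢
    omega
  refine ⟨hk1, hk2, hrun, ?_, ?_⟩
  · -- count of the order = length of its run
    set mid := (s.drop i).take (k - i) with hmid
    have hsplit : s = s.take i ++ (mid ++ (s.drop i).drop (k - i)) := by
      rw [hmid, List.take_append_drop, List.take_append_drop]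
    have hdk : (s.drop i).drop (k - i) = s.drop k := by
      rw [List.drop_drop]
      congr 1
      omega
    have c1 : (s.take i).count o = 0 := by
      rw [List.count_eq_zero]
      intro hmem
      rcases List.mem_iff_getElem.mp hmem with ⟨j, hj, hje⟩
      rw [List.length_take] at hj
      have hj' : j < i := by omega
      have h2 := hfirst j hj'
      rw [List.getD_eq_getElem s 0 (by omega)] at h2
      simp only [List.getElem_take] at hje
      omega
    have hlen : mid.length = k - i := by
      rw [hmid, List.length_take, List.length_drop]
      omega
    have c2 : mid.count o = k - i := by
      have hall : ∀ b ∈ mid, o = b := by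
        intro b hb
        rcases List.mem_iff_getElem.mp hb with ⟨j, hj, hje⟩
        rw [hlen] at hj
        simp only [hmid, List.getElem_take, List.getElem_drop] at hje
        have h2 := hrun (i + j) (by omega) (by omega)
        rw [List.getD_eq_getElem s 0 (by omega)] at h2
        omega
      rw [List.count_eq_length.mpr hall, hlen]
    have c3 : (s.drop k).count o = 0 := by
      rw [List.count_eq_zero]
      intro hmem
      rcases List.mem_iff_getElem.mp hmem with ⟨j, hj, hje⟩
      rw [List.length_drop] at hj
      simp only [List.getElem_drop] at hje
      have hkl : k < s.length := by omega
      have h1 := hgt hkl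
      rw [List.getD_eq_getElem s 0 hkl] at h1
      have h2 : s[k] ≤ s[k + j]'(by omega) := by
        rcases Nat.eq_zero_or_pos j with rfl | hj0
        · simp
        · exact hpg k (k + j) hkl (by omega) (by omega)
      omega
    conv_lhs => rw [hsplit]
    rw [List.count_append, List.count_append, c1, c2, hdk, c3]
    omega
  · -- the skip position starts a strictly larger group
    intro hkl j hj
    have h1 := hgt hkl
    rcases Nat.lt_or_ge j i with hji | hji
    · have h2 := hfirst j hji
      omega
    · have h2 := hrun j hji hj
      omega

-- ---- the inner insertion fold of A's while loop ----
theorem foldl_insert_items (base : Int) :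
    ∀ (es : List Int) (st : Int) (d : PySem.Dict Int Int),
      (∀ p ∈ d.items, p.1 < base + st + 1) →
      ((PySem.List.enumerate es st).foldl (fun d je => d.insert (base + je.1 + 1) je.2) d).items
          = d.items ++ chunkAt base es st
        ∧ ∀ p ∈ ((PySem.List.enumerate es st).foldl (fun d je => d.insert (base + je.1 + 1) je.2) d).items,
            p.1 < base + st + (es.length : Int) + 1 := by
  intro es
  induction es with
  | nil =>
    intro st d h
    refine ⟨by simp [PySem.List.enumerate, chunkAt], ?_⟩
    intro p hp
    simp only [PySem.List.enumerate, List.foldl_nil] at hp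
    have := h p hp
    simp only [List.length_nil, Nat.cast_zero]
    omega
  | cons e es ih =>
    intro st d h
    rw [PySem.List.enumerate_cons, List.foldl_cons]
    have hc : d.contains (base + st + 1) = false := by
      rw [Bool.eq_false_iff]
      simp only [PySem.Dict.contains, List.any_eq_true, ne_eq]
      rintro ⟨p, hp, hpe⟩
      have := h p hp
      rw [beq_iff_eq] at hpe
      omega
    have hitems : (d.insert (base + st + 1) e).items = d.items ++ [(base + st + 1, e)] := by
      simp [PySem.Dict.insert, hc]
    have hb' : ∀ p ∈ (d.insert (base + st + 1) e).items, p.1 < base + (st + 1) + 1 := by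
      rw [hitems]
      intro p hp
      rcases List.mem_append.mp hp with hp | hp
      · have := h p hp; omega
      · rcases List.mem_singleton.mp hp with rfl; simp
    obtain ⟨h1, h2⟩ := ih (st + 1) (d.insert (base + st + 1) e) hb'
    have hchunk : chunkAt base (e :: es) st = (base + st + 1, e) :: chunkAt base es (st + 1) := by
      simp [chunkAt, PySem.List.enumerate_cons]
    refine ⟨?_, ?_⟩
    · rw [h1, hitems, hchunk, List.append_assoc, List.singleton_append]
    · intro p hp
      have := h2 p hp
      simp only [List.length_cons] at *
      push_cast at this ⊢
      omega

-- ---- A's while loop builds exactly the blocks list ----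
theorem admLoopA_items (s : List Int) (pbo : PySem.Dict Int (List Int)) (hs : s.Pairwise (· ≤ ·))
    (hcnt : ∀ o, (PySem.List.sorted (pbo.getD o []) (fun x => x) false).length ≤ s.count o) :
    ∀ (n i : Nat) (osp : PySem.Dict Int Int), s.length - i ≤ n →
      (i < s.length → ∀ j, j < i → s.getD j 0 < s.getD i 0) →
      (∀ p ∈ osp.items, p.1 < (i : Int) + 1) →
      (admLoopA s pbo i osp).items
        = osp.items ++ blocksA s (fun o => PySem.List.sorted (pbo.getD o []) (fun x => x) false) i := by
  intro n
  induction n with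
  | zero =>
    intro i osp hn hinv hb
    have hno : ¬ i < s.length := by omega
    rw [admLoopA, blocksA]
    simp [hno]
  | succ n ih =>
    intro i osp hn hinv hb
    by_cases h : i < s.length
    · obtain ⟨hk1, hk2, hrun, hkc, hkg⟩ := skip_facts s hs i h (hinv h)
      have hm := hcnt (s.getD i 0)
      obtain ⟨h1, h2⟩ := foldl_insert_items (i : Int)
        (PySem.List.sorted (pbo.getD (s.getD i 0) []) (fun x => x) false) 0 osp
        (by intro p hp; have := hb p hp; omega)
      rw [admLoopA]
      simp only [if_pos h]
      rw [ih (admSkipA s (s.getD i 0) (i + 1)) _ (by omega) (fun h' j hj => hkg h' j hj)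
        (by
          intro p hp
          have := h2 p hp
          have hle : (PySem.List.sorted (pbo.getD (s.getD i 0) []) (fun x => x) false).length
              ≤ admSkipA s (s.getD i 0) (i + 1) - i := by omega
          push_cast at this
          omega)]
      rw [h1]
      conv_rhs => rw [blocksA]
      simp only [if_pos h]
      rw [List.append_assoc]
    · have hno := h
      rw [admLoopA, blocksA]
      simp [hno]

-- ---- structure of the blocks list ----
theorem chunkAt_fst_mem (base : Int) (es : List Int) (st : Int) (p : Int × Int)
    (hp : p ∈ chunkAt base es st) : ∃ (kk : Nat), kk < es.length ∧ p.1 = base + (st + kk) + 1 := by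
  rcases List.mem_map.mp hp with ⟨je, hje, rfl⟩
  rcases (PySem.List.mem_enumerate_iff es st je).mp hje with ⟨kk, hkk, rfl⟩
  exact ⟨kk, hkk, rfl⟩

theorem blocksA_fst_gt (s : List Int) (E : Int → List Int) :
    ∀ (n i : Nat), s.length - i ≤ n → ∀ p ∈ blocksA s E i, (i : Int) < p.1 := by
  intro n
  induction n with
  | zero =>
    intro i hn p hp
    have : ¬ i < s.length := by omega
    rw [blocksA, if_neg this] at hp
    cases hp
  | succ n ih =>
    intro i hn p hp
    by_cases h : i < s.length
    · rw [blocksA, if_pos h] at hp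
      rcases List.mem_append.mp hp with hp | hp
      · rcases chunkAt_fst_mem _ _ _ _ hp with ⟨kk, _, he⟩
        rw [he]
        omega
      · have hsk := le_admSkipA s (s.getD i 0) (i + 1)
        have := ih (admSkipA s (s.getD i 0) (i + 1)) (by omega) p hp
        omega
    · rw [blocksA, if_neg h] at hp
      cases hp

theorem blocksA_pairwise (s : List Int) (E : Int → List Int) (hs : s.Pairwise (· ≤ ·))
    (hcnt : ∀ o, (E o).length ≤ s.count o) :
    ∀ (n i : Nat), s.length - i ≤ n →
      (i < s.length → ∀ j, j < i → s.getD j 0 < s.getD i 0) →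
      (blocksA s E i).Pairwise (fun a b => a.1 < b.1) := by
  intro n
  induction n with
  | zero =>
    intro i hn hinv
    have : ¬ i < s.length := by omega
    rw [blocksA, if_neg this]
    exact List.Pairwise.nil
  | succ n ih =>
    intro i hn hinv
    by_cases h : i < s.length
    · obtain ⟨hk1, hk2, hrun, hkc, hkg⟩ := skip_facts s hs i h (hinv h)
      have hm := hcnt (s.getD i 0)
      rw [blocksA, if_pos h]
      rw [List.pairwise_append]
      refine ⟨?_, ih _ (by omega) (fun h' j hj => hkg h' j hj), ?_⟩
      · -- inside one chunk: positions strictly increase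
        rw [chunkAt, List.pairwise_map]
        exact (PySem.List.pairwise_lt_enumerate (E (s.getD i 0)) 0).imp (fun hlt => by omega)
      · intro p hp q hq
        rcases chunkAt_fst_mem _ _ _ _ hp with ⟨kk, hkk, he⟩
        have hq' := blocksA_fst_gt s E (s.length - admSkipA s (s.getD i 0) (i + 1))
          (admSkipA s (s.getD i 0) (i + 1)) (by omega) q hq
        rw [he]
        omega
    · rw [blocksA, if_neg h]
      exact List.Pairwise.nil

theorem blocksA_eq_flatMap (s : List Int) (E : Int → List Int) (hs : s.Pairwise (· ≤ ·)) :
    ∀ (n i : Nat), s.length - i ≤ n → i ≤ s.length →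
      (i < s.length → ∀ j, j < i → s.getD j 0 < s.getD i 0) →
      blocksA s E i = (PySem.Set.ofList (s.drop i)).flatMap
        (fun o => chunkAt ((PySem.List.bisectLeft s o : Nat) : Int) (E o) 0) := by
  intro n
  induction n with
  | zero =>
    intro i hn hile hinv
    have h0 : ¬ i < s.length := by omega
    have : i = s.length := by omega
    rw [blocksA, if_neg h0, this, List.drop_length]
    rfl
  | succ n ih =>
    intro i hn hile hinv
    by_cases h : i < s.length
    · obtain ⟨hk1, hk2, hrun, hkc, hkg⟩ := skip_facts s hs i h (hinv h)
      have hdk : (s.drop i).drop (admSkipA s (s.getD i 0) (i + 1) - i)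
          = s.drop (admSkipA s (s.getD i 0) (i + 1)) := by
        rw [List.drop_drop]
        congr 1
        omega
      have hdecomp : s.drop i = ((s.drop i).take (admSkipA s (s.getD i 0) (i + 1) - i))
          ++ s.drop (admSkipA s (s.getD i 0) (i + 1)) := by
        rw [← hdk, List.take_append_drop]
      have hu : ((s.drop i).take (admSkipA s (s.getD i 0) (i + 1) - i)) ≠ [] := by
        refine List.ne_nil_of_length_pos ?_
        rw [List.length_take, List.length_drop]
        omega
      have hall : ∀ x ∈ (s.drop i).take (admSkipA s (s.getD i 0) (i + 1) - i), x = s.getD i 0 := by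
        intro x hx
        rcases List.mem_iff_getElem.mp hx with ⟨j, hj, hje⟩
        rw [List.length_take, List.length_drop] at hj
        simp only [List.getElem_take, List.getElem_drop] at hje
        have := hrun (i + j) (by omega) (by omega)
        rw [List.getD_eq_getElem s 0 (by omega)] at this
        omega
      have hnotin : s.getD i 0 ∉ s.drop (admSkipA s (s.getD i 0) (i + 1)) := by
        intro hmem
        rcases List.mem_iff_getElem.mp hmem with ⟨j, hj, hje⟩
        rw [List.length_drop] at hj
        simp only [List.getElem_drop] at hje
        have hkl : admSkipA s (s.getD i 0) (i + 1) < s.length := by omega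
        have h1 := hkg hkl i hk2
        have hpg := List.pairwise_iff_getElem.mp hs
        have h2 : s[admSkipA s (s.getD i 0) (i + 1)] ≤ s[admSkipA s (s.getD i 0) (i + 1) + j]'(by omega) := by
          rcases Nat.eq_zero_or_pos j with rfl | hj0
          · simp
          · exact hpg _ _ hkl (by omega) (by omega)
        rw [List.getD_eq_getElem s 0 hkl] at h1
        omega
      rw [blocksA, if_pos h]
      conv_rhs => rw [hdecomp]
      rw [ofList_run_append (s.getD i 0) _ _ hu hall hnotin, List.flatMap_cons]
      rw [bisectLeft_boundary s hs i h (hinv h)]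
      rw [ih _ (by omega) (by omega) (fun h' j hj => hkg h' j hj)]
    · have : i = s.length := by omega
      rw [blocksA, if_neg h, this, List.drop_length]
      rfl

-- ---- B's fold: peel off the accumulator ----
theorem foldB_snd (s : List Int) :
    ∀ (l : List (Int × Int)) (d : PySem.Dict Int Int) (acc : List (Int × Int)),
      (l.foldl (fun (st : PySem.Dict Int Int × List (Int × Int)) oe =>
        (st.1.insert oe.1 (st.1.getD oe.1 0 + 1),
         st.2 ++ [(((PySem.List.bisectLeft s oe.1 : Nat) : Int) + st.1.getD oe.1 0 + 1, oe.2)]))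
        (d, acc)).2 = acc ++ goB s l d := by
  intro l
  induction l with
  | nil => intro d acc; simp [goB]
  | cons oe t ih =>
    intro d acc
    rw [List.foldl_cons, goB, ih, List.append_assoc, List.singleton_append]

-- ---- B's fold produces the blocks, grouped by distinct order ----
theorem goB_spec (s : List Int) :
    ∀ (l : List (Int × Int)) (d : PySem.Dict Int Int),
      (l.map (fun p => p.1)).Pairwise (· ≤ ·) →
      goB s l d = (PySem.Set.ofList (l.map (fun p => p.1))).flatMap
        (fun o => chunkAt ((PySem.List.bisectLeft s o : Nat) : Int)
          ((l.filter (fun p => p.1 == o)).map (fun p => p.2)) (d.getD o 0)) := by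
  intro l
  induction l with
  | nil => intro d _; simp [goB, PySem.Set.ofList_nil]
  | cons oe t ih =>
    intro d hp
    rw [List.map_cons, List.pairwise_cons] at hp
    obtain ⟨hhead, htail⟩ := hp
    rw [goB, ih _ htail, List.map_cons, PySem.Set.ofList_cons, List.flatMap_cons]
    have hfilter_cons : ∀ o : Int, oe.1 ≠ o →
        (oe :: t).filter (fun p => p.1 == o) = t.filter (fun p => p.1 == o) := by
      intro o hne
      rw [List.filter_cons]
      simp [hne]
    have hchunk_head : ((oe :: t).filter (fun p => p.1 == oe.1)).map (fun p => p.2)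
        = oe.2 :: (t.filter (fun p => p.1 == oe.1)).map (fun p => p.2) := by
      rw [List.filter_cons]
      simp
    by_cases hmem : oe.1 ∈ t.map (fun p => p.1)
    · -- the next pair has the same order: merge into the same block
      cases t with
      | nil => simp at hmem
      | cons q t' =>
        have hq1 : q.1 = oe.1 := by
          rw [List.map_cons] at hmem
          rw [List.map_cons, List.pairwise_cons] at htail
          rcases List.mem_cons.mp hmem with he | hm
          · simpa using he.symm
          · have h1 : oe.1 ≤ q.1 := by simpa using hhead q.1 (by simp)
            have h2 : q.1 ≤ oe.1 := by simpa using htail.1 oe.1 hm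
            omega
        have hofl : PySem.Set.ofList ((q :: t').map (fun p => p.1))
            = oe.1 :: (PySem.Set.ofList (t'.map (fun p => p.1))).discard oe.1 := by
          rw [List.map_cons, PySem.Set.ofList_cons, hq1]
        have hdiscard : ((PySem.Set.ofList ((q :: t').map (fun p => p.1))).discard oe.1)
            = (PySem.Set.ofList (t'.map (fun p => p.1))).discard oe.1 := by
          rw [hofl]
          simp only [PySem.Set.discard, List.filter_cons]
          simp [List.filter_filter]
        rw [hdiscard, hofl, List.flatMap_cons]
        -- head block
        rw [hchunk_head]
        have hgetD : (d.insert oe.1 (d.getD oe.1 0 + 1)).getD oe.1 0 = d.getD oe.1 0 + 1 :=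
          PySem.Dict.getD_insert_self d oe.1 _ 0
        rw [hgetD]
        have henum : chunkAt ((PySem.List.bisectLeft s oe.1 : Nat) : Int)
            (oe.2 :: ((q :: t').filter (fun p => p.1 == oe.1)).map (fun p => p.2)) (d.getD oe.1 0)
            = (((PySem.List.bisectLeft s oe.1 : Nat) : Int) + d.getD oe.1 0 + 1, oe.2) ::
              chunkAt ((PySem.List.bisectLeft s oe.1 : Nat) : Int)
                (((q :: t').filter (fun p => p.1 == oe.1)).map (fun p => p.2)) (d.getD oe.1 0 + 1) := by
          simp [chunkAt, PySem.List.enumerate_cons]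
        rw [henum, List.cons_append]
        congr 1
        congr 1
        refine List.flatMap_congr ?_
        intro o ho
        have hne : o ≠ oe.1 := ((PySem.Set.mem_discard _ _ _).mp ho).2
        rw [hfilter_cons o (fun he => hne he.symm),
          PySem.Dict.getD_insert_of_ne d _ 0 hne]
    · -- a fresh order: its own block, with exactly one pair here
      have hdiscard : (PySem.Set.ofList (t.map (fun p => p.1))).discard oe.1
          = PySem.Set.ofList (t.map (fun p => p.1)) := by
        simp only [PySem.Set.discard]
        refine List.filter_eq_self.mpr ?_
        intro y hy
        have : y ∈ t.map (fun p => p.1) := (PySem.Set.mem_ofList _ _).mp hy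
        have : y ≠ oe.1 := fun he => hmem (he ▸ this)
        simp [this]
      rw [hdiscard, hchunk_head]
      have hfe : t.filter (fun p => p.1 == oe.1) = [] := by
        rw [List.filter_eq_nil_iff]
        intro p hp
        have : p.1 ∈ t.map (fun x => x.1) := List.mem_map_of_mem hp
        intro hbe
        rw [beq_iff_eq] at hbe
        exact hmem (hbe ▸ this)
      rw [hfe]
      have henum : chunkAt ((PySem.List.bisectLeft s oe.1 : Nat) : Int)
          (oe.2 :: ([] : List (Int × Int)).map (fun p => p.2)) (d.getD oe.1 0)
          = [(((PySem.List.bisectLeft s oe.1 : Nat) : Int) + d.getD oe.1 0 + 1, oe.2)] := by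
        simp [chunkAt, PySem.List.enumerate]
      rw [henum, List.singleton_append]
      congr 1
      refine List.flatMap_congr ?_
      intro o ho
      have homem : o ∈ t.map (fun p => p.1) := (PySem.Set.mem_ofList _ _).mp ho
      have hne : o ≠ oe.1 := fun he => hmem (he ▸ homem)
      rw [hfilter_cons o (fun he => hne he.symm),
        PySem.Dict.getD_insert_of_ne d _ 0 hne]

-- ---- the per-order exponent lists of A and B coincide ----
theorem pairwise_snd_filter_admOP (sig : List Int) (psis : List (Int × Int)) (o : Int) :
    (((admOP sig psis).filter (fun p => p.1 == o)).map (fun p => p.2)).Pairwise (· ≤ ·) := by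
  rw [List.pairwise_map]
  have h1 : (admOP sig psis).Pairwise lexR := sorted2_pairwise_lexR (admLB sig psis)
  have h2 := h1.filter (fun p => p.1 == o)
  refine h2.imp_of_mem ?_
  intro a b ha hb hab
  have ha' : a.1 = o := by simpa using (List.mem_filter.mp ha).2
  have hb' : b.1 = o := by simpa using (List.mem_filter.mp hb).2
  unfold lexR at hab
  omega

theorem EA_eq (sig : List Int) (psis : List (Int × Int)) (hpre : Pre_adm_key sig psis) (o : Int) :
    PySem.List.sorted
      ((((PySem.List.sorted (PySem.List.enumerate sig 0) (fun k => k.2) false).filterMap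
          (fun q => ((PySem.Dict.mk psis).get? (q.1 + 1)).map (fun e => (q.2, e)))).foldl
        (fun d q => d.modify q.1 [] (fun l => l ++ [q.2])) PySem.Dict.empty).getD o [])
      (fun x => x) false
    = admE sig psis o := by
  rw [PySem.Dict.getD_foldl_modify_append]
  rw [show (PySem.Dict.empty : PySem.Dict Int (List Int)).getD o [] = [] from rfl, List.nil_append]
  have hperm : ((((PySem.List.sorted (PySem.List.enumerate sig 0) (fun k => k.2) false).filterMap
        (fun q => ((PySem.Dict.mk psis).get? (q.1 + 1)).map (fun e => (q.2, e)))).filter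
        (fun p => p.1 == o)).map (fun p => p.2)).Perm
      (((admOP sig psis).filter (fun p => p.1 == o)).map (fun p => p.2)) := by
    refine List.Perm.map _ (List.Perm.filter _ ?_)
    exact (LS_perm_LB sig psis hpre).trans
      (PySem.List.sorted2_perm (admLB sig psis) (fun p => p.1) (fun p => p.2) false).symm
  rw [admE, PySem.List.sorted_eq_sorted_of_perm _ _ (fun x => x) (fun a b h => h) hperm]
  exact PySem.List.sorted_eq_self_of_pairwise _ _ (pairwise_snd_filter_admOP sig psis o)

-- ---- the g-domains: every order of s, or only orders carrying a psi ----
theorem flatMap_domain_bridge (sig : List Int) (psis : List (Int × Int)) :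
    (PySem.Set.ofList (admS sig)).flatMap
        (fun o => chunkAt ((PySem.List.bisectLeft (admS sig) o : Nat) : Int) (admE sig psis o) 0)
      = (PySem.Set.ofList ((admOP sig psis).map (fun p => p.1))).flatMap
        (fun o => chunkAt ((PySem.List.bisectLeft (admS sig) o : Nat) : Int) (admE sig psis o) 0) := by
  have hfst_le : ((admOP sig psis).map (fun p => p.1)).Pairwise (· ≤ ·) := by
    rw [List.pairwise_map]
    exact (sorted2_pairwise_lexR (admLB sig psis)).imp (fun h => by unfold lexR at h; omega)
  have hd1 : PySem.Set.ofList ((admOP sig psis).map (fun p => p.1))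
      = (PySem.Set.ofList (admS sig)).filter
          (fun o => decide (o ∈ (admOP sig psis).map (fun p => p.1))) := by
    refine eq_of_pairwise_lt_of_mem_iff _ _ (pairwise_lt_ofList _ hfst_le)
      ((pairwise_lt_ofList _ (PySem.List.sorted_pairwise sig (fun x => x))).filter _) ?_
    intro x
    rw [List.mem_filter, PySem.Set.mem_ofList, PySem.Set.mem_ofList]
    constructor
    · intro hx
      refine ⟨?_, by simpa using hx⟩
      rcases List.mem_map.mp hx with ⟨p, hp, rfl⟩
      have hlb : p ∈ admLB sig psis :=
        (PySem.List.sorted2_perm (admLB sig psis) (fun p => p.1) (fun p => p.2) false).mem_iff.mp hp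
      exact fst_LB_mem sig psis p hlb
    · intro ⟨_, hx⟩
      simpa using hx
  rw [hd1]
  refine flatMap_filter_of_nil _ _ _ ?_
  intro o _ hfalse
  have hno : o ∉ (admOP sig psis).map (fun p => p.1) := by simpa using hfalse
  have hnil : (admOP sig psis).filter (fun p => p.1 == o) = [] := by
    rw [List.filter_eq_nil_iff]
    intro p hp hbe
    rw [beq_iff_eq] at hbe
    exact hno (hbe ▸ List.mem_map_of_mem hp)
  rw [admE, hnil]
  simp [chunkAt]

-- ---- evaluating the two ports ----
theorem adm_key_alt_eval (sig : List Int) (psis : List (Int × Int)) :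
    adm_key_alt sig psis
      = (admS sig, (PySem.Set.ofList ((admOP sig psis).map (fun p => p.1))).flatMap
          (fun o => chunkAt ((PySem.List.bisectLeft (admS sig) o : Nat) : Int)
            (admE sig psis o) 0)) := by
  simp only [adm_key_alt]
  refine Prod.ext rfl ?_
  show (List.foldl (fun (st : PySem.Dict Int Int × List (Int × Int)) oe =>
      (st.1.insert oe.1 (st.1.getD oe.1 0 + 1),
       st.2 ++ [(((PySem.List.bisectLeft (admS sig) oe.1 : Nat) : Int) + st.1.getD oe.1 0 + 1, oe.2)]))
      (PySem.Dict.empty, []) (admOP sig psis)).2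
    = (PySem.Set.ofList ((admOP sig psis).map (fun p => p.1))).flatMap
        (fun o => chunkAt ((PySem.List.bisectLeft (admS sig) o : Nat) : Int) (admE sig psis o) 0)
  rw [foldB_snd (admS sig) (admOP sig psis) PySem.Dict.empty []]
  rw [List.nil_append]
  rw [goB_spec (admS sig) (admOP sig psis) PySem.Dict.empty
    (by
      rw [List.pairwise_map]
      exact (sorted2_pairwise_lexR (admLB sig psis)).imp (fun h => by unfold lexR at h; omega))]
  simp only [show ∀ o : Int, (PySem.Dict.empty : PySem.Dict Int Int).getD o 0 = 0 from fun _ => rfl]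
  rfl

theorem adm_key_eval (sig : List Int) (psis : List (Int × Int)) (hpre : Pre_adm_key sig psis) :
    adm_key sig psis
      = (admS sig, (PySem.Set.ofList (admS sig)).flatMap
          (fun o => chunkAt ((PySem.List.bisectLeft (admS sig) o : Nat) : Int)
            (admE sig psis o) 0)) := by
  simp only [adm_key]
  rw [phase1_snd psis]
  have hss : (PySem.List.enumerate
      (PySem.List.sorted (PySem.List.enumerate sig 0) (fun k => k.2) false) 0).map
        (fun p => p.2.2) = admS sig := by
    rw [show (fun p : Int × Int × Int => p.2.2)
        = (fun q : Int × Int => q.2) ∘ (fun p : Int × Int × Int => p.2) from rfl,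
      ← List.map_map, PySem.List.map_snd_enumerate, map_snd_sorted_enumerate]
  have hfm : (PySem.List.enumerate
      (PySem.List.sorted (PySem.List.enumerate sig 0) (fun k => k.2) false) 0).filterMap
        (fun p => ((PySem.Dict.mk psis).get? (p.2.1 + 1)).map (fun e => (p.2.2, e)))
      = (PySem.List.sorted (PySem.List.enumerate sig 0) (fun k => k.2) false).filterMap
        (fun q => ((PySem.Dict.mk psis).get? (q.1 + 1)).map (fun e => (q.2, e))) :=
    filterMap_enumerate_snd (fun q => ((PySem.Dict.mk psis).get? (q.1 + 1)).map (fun e => (q.2, e)))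
      (PySem.List.sorted (PySem.List.enumerate sig 0) (fun k => k.2) false) 0
  simp only [hss, hfm, List.nil_append]
  have hs : (admS sig).Pairwise (· ≤ ·) := PySem.List.sorted_pairwise sig (fun x => x)
  have hcnt : ∀ o, (PySem.List.sorted
      ((((PySem.List.sorted (PySem.List.enumerate sig 0) (fun k => k.2) false).filterMap
          (fun q => ((PySem.Dict.mk psis).get? (q.1 + 1)).map (fun e => (q.2, e)))).foldl
        (fun d q => d.modify q.1 [] (fun l => l ++ [q.2])) PySem.Dict.empty).getD o [])
      (fun x => x) false).length ≤ (admS sig).count o := by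
    intro o
    rw [PySem.List.length_sorted, PySem.Dict.getD_foldl_modify_append,
      show (PySem.Dict.empty : PySem.Dict Int (List Int)).getD o [] = [] from rfl,
      List.nil_append, List.length_map, ← List.countP_eq_length_filter,
      (LS_perm_LB sig psis hpre).countP_eq]
    exact countLB_le sig psis hpre o
  have hloop := admLoopA_items (admS sig) _ hs hcnt (admS sig).length 0 PySem.Dict.empty
    (by omega) (by intro _ j hj; omega) (by intro p hp; cases hp)
  rw [hloop, show (PySem.Dict.empty : PySem.Dict Int Int).items = [] from rfl, List.nil_append]
  have hEA : (fun o => PySem.List.sorted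
      ((((PySem.List.sorted (PySem.List.enumerate sig 0) (fun k => k.2) false).filterMap
          (fun q => ((PySem.Dict.mk psis).get? (q.1 + 1)).map (fun e => (q.2, e)))).foldl
        (fun d q => d.modify q.1 [] (fun l => l ++ [q.2])) PySem.Dict.empty).getD o [])
      (fun x => x) false) = admE sig psis :=
    funext (fun o => EA_eq sig psis hpre o)
  rw [hEA]
  have hcnt' : ∀ o, (admE sig psis o).length ≤ (admS sig).count o := by
    intro o
    have := hcnt o
    rwa [show PySem.List.sorted
        ((((PySem.List.sorted (PySem.List.enumerate sig 0) (fun k => k.2) false).filterMap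
            (fun q => ((PySem.Dict.mk psis).get? (q.1 + 1)).map (fun e => (q.2, e)))).foldl
          (fun d q => d.modify q.1 [] (fun l => l ++ [q.2])) PySem.Dict.empty).getD o [])
        (fun x => x) false = admE sig psis o from congrFun hEA o] at this
  have hpw : (blocksA (admS sig) (admE sig psis) 0).Pairwise lexR :=
    (blocksA_pairwise (admS sig) (admE sig psis) hs hcnt' (admS sig).length 0
      (by omega) (by intro _ j hj; omega)).imp (fun h => Or.inl h)
  rw [sorted2_eq_of_perm_of_pairwise _ _ (List.Perm.refl _) hpw]
  rw [blocksA_eq_flatMap (admS sig) (admE sig psis) hs (admS sig).length 0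
    (by omega) (by omega) (by intro _ j hj; omega)]
  rw [List.drop_zero]
-- ===== VERDICT (by name: the statement is the Claim_ definition above) =====
theorem adm_key_spec : Claim_equal_adm_key := by
  unfold Claim_equal_adm_key
  intro sig psis _ hpre
  unfold Spec_adm_key
  rw [adm_key_eval sig psis hpre, adm_key_alt_eval sig psis, flatMap_domain_bridge sig psis]
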